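-- pv_equiv track=rewrite | github.com/jchy20/how-much-backtrack | reasoning-gym/reasoning_gym/arc/arc_1d_tasks.py | transform_paint_biggest_block
-- ===== SOURCE A (Python) =====
-- def transform_paint_biggest_block(input_grid: list[int]) -> list[int]:
--     size = len(input_grid)
--     # 1. Identify all contiguous non-zero runs (blocks)
--     runs = []
--     i = 0
--     while i < size:
--         if input_grid[i] != 0:
--             start = i
--             while i < size and input_grid[i] != 0:
--                 i += 1
--             runs.append((start, i - start))
--         else:
--             i += 1
--
--     # If fewer than two blocks, nothing to do
--     if len(runs) < 2:
--         return input_grid.copy()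
--
--     # 2. Find the unique largest block
--     biggest_start, biggest_len = max(runs, key=lambda x: x[1])
--
--     # 3. Paint that block to color 1
--     output = input_grid.copy()
--     for offset in range(biggest_len):
--         output[biggest_start + offset] = 1
--
--     return output
-- ===== SOURCE B (Python) =====
-- def transform_paint_biggest_block(input_grid: list[int]) -> list[int]:
--     # Single linear pass: track the in-progress run and the best run seen so far
--     # (strict > keeps the first of tied lengths, like max over the runs list),
--     # then paint with a comprehension instead of index assignments.
--     best_start = best_len = 0
--     cur_start = cur_len = 0
--     count = 0
--     for i, v in enumerate(input_grid):
--         if v != 0: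
--             if cur_len == 0:
--                 cur_start = i
--             cur_len += 1
--         else:
--             if cur_len > 0:
--                 count += 1
--                 if cur_len > best_len:
--                     best_start, best_len = cur_start, cur_len
--                 cur_len = 0
--     if cur_len > 0:
--         count += 1
--         if cur_len > best_len:
--             best_start, best_len = cur_start, cur_len
--     if count < 2:
--         return input_grid.copy()
--     return [1 if best_start <= i < best_start + best_len else v
--             for i, v in enumerate(input_grid)]
-- ===== Notes on version B (the rewrite author's own statement) =====
-- stated objective: alternative
-- what changed: Replaces the build-a-runs-list-then-max-then-in-place-paint pipeline by one linear pass maintaining current/best run and a block count, with the output built by a comprehension instead of index assignments.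
import Mathlib
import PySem

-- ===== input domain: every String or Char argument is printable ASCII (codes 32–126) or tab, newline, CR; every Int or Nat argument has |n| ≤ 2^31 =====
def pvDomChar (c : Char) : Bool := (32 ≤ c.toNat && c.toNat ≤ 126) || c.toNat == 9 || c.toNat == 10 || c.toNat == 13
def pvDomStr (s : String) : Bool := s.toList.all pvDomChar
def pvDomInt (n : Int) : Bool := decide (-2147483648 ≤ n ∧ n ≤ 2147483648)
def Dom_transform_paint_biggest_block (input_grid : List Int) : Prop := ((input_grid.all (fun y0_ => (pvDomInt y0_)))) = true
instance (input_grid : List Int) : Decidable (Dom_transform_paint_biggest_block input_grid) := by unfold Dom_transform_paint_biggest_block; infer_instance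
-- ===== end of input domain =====

-- B replaces A's runs-list + max + in-place-paint pipeline by one pass tracking
-- current/best run and a block count, painting via a comprehension (alternative
-- decomposition, same O(n) cost).


-- ===== PORT A =====
-- inner 'while i < size and input_grid[i] != 0': consume the nonzero prefix,
-- returning the new index and the remaining suffix
def pvTakeRun : List Int → Int → Int × List Int
  | [], i => (i, [])
  | x :: xs, i => if x ≠ 0 then pvTakeRun xs (i + 1) else (i, x :: xs)

-- needed by pvCollectRuns's termination proof
theorem pvTakeRun_len : ∀ (xs : List Int) (i : Int), (pvTakeRun xs i).2.length ≤ xs.length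
  | [], _ => le_refl _
  | x :: xs, i => by
    by_cases h : x ≠ 0 <;> simp [pvTakeRun, h]
    exact le_trans (pvTakeRun_len xs (i + 1)) (Nat.le_succ _)

-- outer while loop collecting (start, length) of each nonzero run
def pvCollectRuns (xs : List Int) (i : Int) : List (Int × Int) :=
  match xs with
  | [] => []
  | x :: rest =>
    if x ≠ 0 then
      (i, (pvTakeRun (x :: rest) i).1 - i) ::
        pvCollectRuns (pvTakeRun (x :: rest) i).2 (pvTakeRun (x :: rest) i).1
    else pvCollectRuns rest (i + 1)
termination_by xs.length
decreasing_by
  · simp only [pvTakeRun, if_pos ‹x ≠ 0›]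
    exact Nat.lt_succ_of_le (pvTakeRun_len rest (i + 1))
  · simp

-- 'for offset in range(biggest_len): output[biggest_start + offset] = 1';
-- the index is always in range in A, so the total pySetD is exact here
def pvPaint (out : List Int) (s L : Int) : List Int :=
  (PySem.List.pyRange 0 L 1).foldl (fun o off => PySem.List.pySetD o (s + off) 1) out

def transform_paint_biggest_block (input_grid : List Int) : List Int :=
  let runs := pvCollectRuns input_grid 0
  if runs.length < 2 then input_grid
  else
    match PySem.List.max? runs (fun x => x.2) with
    | some best => pvPaint input_grid best.1 best.2
    | none => input_grid  -- unreachable (runs has length ≥ 2); Python's max would raise on []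

-- ===== PORT B =====
-- state (best_start, best_len, cur_start, cur_len, count)
def pvStep (st : Int × Int × Int × Int × Int) (p : Int × Int) : Int × Int × Int × Int × Int :=
  if p.2 ≠ 0 then
    (st.1, st.2.1, if st.2.2.2.1 = 0 then p.1 else st.2.2.1, st.2.2.2.1 + 1, st.2.2.2.2)
  else if 0 < st.2.2.2.1 then
    if st.2.1 < st.2.2.2.1 then (st.2.2.1, st.2.2.2.1, st.2.2.1, 0, st.2.2.2.2 + 1)
    else (st.1, st.2.1, st.2.2.1, 0, st.2.2.2.2 + 1)
  else st

def transform_paint_biggest_block_alt (input_grid : List Int) : List Int :=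
  let st := (PySem.List.enumerate input_grid 0).foldl pvStep (0, 0, 0, 0, 0)
  let best := if 0 < st.2.2.2.1 ∧ st.2.1 < st.2.2.2.1 then (st.2.2.1, st.2.2.2.1) else (st.1, st.2.1)
  let count := if 0 < st.2.2.2.1 then st.2.2.2.2 + 1 else st.2.2.2.2
  if count < 2 then input_grid
  else (PySem.List.enumerate input_grid 0).map
    (fun p => if best.1 ≤ p.1 ∧ p.1 < best.1 + best.2 then (1 : Int) else p.2)

-- ===== PRECONDITION & SPEC =====
def Spec_transform_paint_biggest_block (input_grid : List Int) (out : List Int) : Prop := out = transform_paint_biggest_block_alt input_grid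
instance (input_grid : List Int) (out : List Int) : Decidable (Spec_transform_paint_biggest_block input_grid out) := by unfold Spec_transform_paint_biggest_block; infer_instance

-- ===== CLAIM (what is proved, stated in full; the proofs are below) =====
def Claim_equal_transform_paint_biggest_block : Prop := ∀ (input_grid : List Int), Dom_transform_paint_biggest_block input_grid → Spec_transform_paint_biggest_block input_grid (transform_paint_biggest_block input_grid)

-- ===== LEMMAS AND PROOFS =====

-- best-run update, 'keep the first of ties'
def pvUpd (b r : Int × Int) : Int × Int := if b.2 < r.2 then r else b

-- B's end-of-loop finalisation, as a function of the fold state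
def pvFin (st : Int × Int × Int × Int × Int) : (Int × Int) × Int :=
  (if 0 < st.2.2.2.1 ∧ st.2.1 < st.2.2.2.1 then (st.2.2.1, st.2.2.2.1) else (st.1, st.2.1),
   if 0 < st.2.2.2.1 then st.2.2.2.2 + 1 else st.2.2.2.2)

theorem pvAlt_eq (g : List Int) :
    transform_paint_biggest_block_alt g =
      (let st := (PySem.List.enumerate g 0).foldl pvStep (0, 0, 0, 0, 0)
       if (pvFin st).2 < 2 then g
       else (PySem.List.enumerate g 0).map
         (fun p => if (pvFin st).1.1 ≤ p.1 ∧ p.1 < (pvFin st).1.1 + (pvFin st).1.2 then (1 : Int) else p.2)) := rfl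

theorem pvTakeRun_ge : ∀ (xs : List Int) (i : Int), i ≤ (pvTakeRun xs i).1 := by
  intro xs
  induction xs with
  | nil => intro i; simp [pvTakeRun]
  | cons x xs ih =>
    intro i
    by_cases h : x ≠ 0 <;> simp [pvTakeRun, h]
    exact le_trans (by omega) (ih (i + 1))

theorem pvTakeRun_head : ∀ (xs : List Int) (i : Int) (y : Int) (t : List Int),
    (pvTakeRun xs i).2 = y :: t → y = 0 := by
  intro xs
  induction xs with
  | nil => intro i y t h; simp [pvTakeRun] at h
  | cons x xs ih =>
    intro i y t h
    by_cases hx : x ≠ 0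
    · simp only [pvTakeRun, if_pos hx] at h; exact ih (i + 1) y t h
    · simp only [pvTakeRun, if_neg hx] at h
      rw [Decidable.not_not] at hx
      cases h; omega

-- run-consume: over a nonzero prefix, B's fold only increments cur_len
theorem pvRunConsume : ∀ (xs : List Int) (i bs bl cs cl cnt : Int), 0 < cl →
    (PySem.List.enumerate xs i).foldl pvStep (bs, bl, cs, cl, cnt) =
      (PySem.List.enumerate (pvTakeRun xs i).2 (pvTakeRun xs i).1).foldl pvStep
        (bs, bl, cs, cl + ((pvTakeRun xs i).1 - i), cnt) := by
  intro xs
  induction xs with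
  | nil => intro i bs bl cs cl cnt h; simp [pvTakeRun]
  | cons x xs ih =>
    intro i bs bl cs cl cnt h
    by_cases hx : x ≠ 0
    · simp only [pvTakeRun, if_pos hx, PySem.List.enumerate_cons, List.foldl_cons]
      have hstep : pvStep (bs, bl, cs, cl, cnt) (i, x) = (bs, bl, cs, cl + 1, cnt) := by
        simp [pvStep, hx, show cl ≠ 0 by omega]
      rw [hstep, ih (i + 1) bs bl cs (cl + 1) cnt (by omega)]
      have harith : cl + 1 + ((pvTakeRun xs (i + 1)).1 - (i + 1)) =
          cl + ((pvTakeRun xs (i + 1)).1 - i) := by omega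
      rw [harith]
    · simp [pvTakeRun, hx]

-- runs are positive-length and start at or after i
theorem pvRuns_facts : ∀ (n : Nat) (xs : List Int), xs.length ≤ n → ∀ (i : Int) (r : Int × Int),
    r ∈ pvCollectRuns xs i → i ≤ r.1 ∧ 0 < r.2 := by
  intro n
  induction n with
  | zero =>
    intro xs hn i r hr
    have : xs = [] := List.eq_nil_of_length_eq_zero (by omega)
    subst this; simp [pvCollectRuns] at hr
  | succ n ih =>
    intro xs
    cases xs with
    | nil => intro hn i r hr; simp [pvCollectRuns] at hr
    | cons x rest =>
      intro hn i r hr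
      by_cases hx : x ≠ 0
      · rw [pvCollectRuns, if_pos hx] at hr
        have hj : i + 1 ≤ (pvTakeRun (x :: rest) i).1 := by
          simpa [pvTakeRun, hx] using pvTakeRun_ge rest (i + 1)
        have hlen : (pvTakeRun (x :: rest) i).2.length ≤ n := by
          have := pvTakeRun_len rest (i + 1)
          simp only [pvTakeRun, if_pos hx]
          simp at hn; omega
        rw [List.mem_cons] at hr
        rcases hr with hr | hr
        · subst hr
          exact ⟨le_of_eq rfl, by show 0 < (pvTakeRun (x :: rest) i).1 - i; omega⟩
        · have := ih _ hlen _ _ hr; omega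
      · rw [pvCollectRuns, if_neg hx] at hr
        have := ih rest (by simp at hn; omega) (i + 1) r hr
        omega

-- the crux: B's single pass computes the fold of pvUpd over A's runs list,
-- and the block count is the length of that list
theorem pvMain : ∀ (n : Nat) (xs : List Int), xs.length ≤ n → ∀ (i bs bl cs cnt : Int),
    pvFin ((PySem.List.enumerate xs i).foldl pvStep (bs, bl, cs, 0, cnt)) =
      ((pvCollectRuns xs i).foldl pvUpd (bs, bl), cnt + (pvCollectRuns xs i).length) := by
  intro n
  induction n with
  | zero =>
    intro xs hn i bs bl cs cnt
    have : xs = [] := List.eq_nil_of_length_eq_zero (by omega)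
    subst this; simp [pvCollectRuns, pvFin]
  | succ n ih =>
    intro xs hn i bs bl cs cnt
    match xs with
    | [] => simp [pvCollectRuns, pvFin]
    | x :: rest =>
      by_cases hx : x ≠ 0
      · -- enter a run: first step opens it, pvRunConsume crosses it
        simp only [PySem.List.enumerate_cons, List.foldl_cons]
        have hstep : pvStep (bs, bl, cs, 0, cnt) (i, x) = (bs, bl, i, 1, cnt) := by
          simp [pvStep, hx]
        rw [hstep, pvRunConsume rest (i + 1) bs bl i 1 cnt (by omega)]
        have hcoll : pvCollectRuns (x :: rest) i =
            (i, (pvTakeRun rest (i + 1)).1 - i) ::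
              pvCollectRuns (pvTakeRun rest (i + 1)).2 (pvTakeRun rest (i + 1)).1 := by
          rw [pvCollectRuns, if_pos hx]
          simp only [pvTakeRun, if_pos hx]
        rw [hcoll]
        have hjge : i + 1 ≤ (pvTakeRun rest (i + 1)).1 := pvTakeRun_ge rest (i + 1)
        have hlenrst : (pvTakeRun rest (i + 1)).2.length ≤ n := by
          have := pvTakeRun_len rest (i + 1)
          simp at hn; omega
        have hhead : ∀ y t, (pvTakeRun rest (i + 1)).2 = y :: t → y = 0 :=
          pvTakeRun_head rest (i + 1)
        generalize hT : pvTakeRun rest (i + 1) = T at hjge hlenrst hhead ⊢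
        obtain ⟨j, rst⟩ := T
        simp only at hjge hlenrst hhead ⊢
        have hcl : 1 + (j - (i + 1)) = j - i := by omega
        rw [hcl]
        cases rst with
        | nil =>
          simp only [PySem.List.enumerate_nil, List.foldl_nil, pvCollectRuns,
            List.foldl_cons, List.foldl_nil, List.length_cons, List.length_nil]
          by_cases hb : bl < j - i
          · simp [pvFin, pvUpd, hb]
            omega
          · simp [pvFin, pvUpd, hb]
            omega
        | cons y t =>
          have hy : y = 0 := hhead y t rfl
          subst hy
          simp only [PySem.List.enumerate_cons, List.foldl_cons]
          have hlent : t.length ≤ n := by simp at hlenrst; omega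
          have hcoll2 : pvCollectRuns (0 :: t) j = pvCollectRuns t (j + 1) := by
            rw [pvCollectRuns]; simp
          have hstep2 : pvStep (bs, bl, i, j - i, cnt) (j, 0) =
              ((pvUpd (bs, bl) (i, j - i)).1, (pvUpd (bs, bl) (i, j - i)).2, i, 0, cnt + 1) := by
            simp only [pvStep, pvUpd]
            by_cases hb : bl < j - i
            · simp [hb]
              omega
            · simp [hb]
              omega
          rw [hstep2, ih t hlent (j + 1) _ _ i (cnt + 1), hcoll2]
          simp only [List.length_cons, Prod.mk.injEq]
          constructor
          · trivial
          · push_cast; omega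
      · -- zero: state unchanged
        simp only [PySem.List.enumerate_cons, List.foldl_cons]
        have hstep : pvStep (bs, bl, cs, 0, cnt) (i, x) = (bs, bl, cs, 0, cnt) := by
          simp [pvStep, hx]
        rw [hstep, pvCollectRuns, if_neg hx]
        exact ih rest (by simp at hn; omega) (i + 1) bs bl cs cnt

-- Python's max(runs, key=...) is the first-maximal fold, i.e. pvUpd
theorem pvMax_eq : ∀ (rs : List (Int × Int)) (r : Int × Int),
    PySem.List.max? (r :: rs) (fun x => x.2) = some (rs.foldl pvUpd r) := by
  intro rs
  induction rs with
  | nil => intro r; rfl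
  | cons s rs ih =>
    intro r
    have h1 : PySem.List.max? (r :: s :: rs) (fun x => x.2) =
        PySem.List.max? (pvUpd r s :: rs) (fun x => x.2) := by
      simp only [PySem.List.max?, List.foldl_cons, pvUpd]
      by_cases h : r.2 < s.2 <;> simp [h]
    rw [h1, ih (pvUpd r s), List.foldl_cons]

-- paint characterisation: pvPaint with a Nat length equals B's comprehension
theorem pvPaint_nat : ∀ (m : Nat) (g : List Int) (s : Int), 0 ≤ s →
    pvPaint g s (m : Int) =
      (PySem.List.enumerate g 0).map
        (fun p => if s ≤ p.1 ∧ p.1 < s + (m : Int) then (1 : Int) else p.2) := by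
  intro m
  induction m with
  | zero =>
    intro g s hs
    simp only [Nat.cast_zero, pvPaint, PySem.List.pyRange_one_eq_nil (by omega : (0:Int) ≤ 0),
      List.foldl_nil]
    have : (PySem.List.enumerate g 0).map
        (fun p => if s ≤ p.1 ∧ p.1 < s + (0 : Int) then (1 : Int) else p.2) =
        (PySem.List.enumerate g 0).map (fun p => p.2) := by
      apply List.map_congr_left
      intro p _
      have hno : ¬ (s ≤ p.1 ∧ p.1 < s + (0 : Int)) := by omega
      simp [hno]
    rw [this, PySem.List.map_snd_enumerate]
  | succ m ih =>
    intro g s hs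
    have hstep : pvPaint g s ((m : Int) + 1) =
        PySem.List.pySetD (pvPaint g s (m : Int)) (s + (m : Int)) 1 := by
      rw [pvPaint, pvPaint,
        PySem.List.pyRange_one_succ_right (by positivity : (0:Int) ≤ (m:Int)),
        List.foldl_append, List.foldl_cons, List.foldl_nil]
    rw [show ((m + 1 : Nat) : Int) = (m : Int) + 1 by push_cast; ring]
    rw [hstep, ih g s hs,
      PySem.List.pySetD_of_nonneg _ 1 (show (0:Int) ≤ s + (m:Int) by omega)]
    apply List.ext_getElem
    · simp [PySem.List.length_enumerate]
    · intro k h1 h2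
      simp only [List.getElem_set, List.getElem_map, PySem.List.getElem_enumerate]
      by_cases hkm : (s + (m : Int)).toNat = k
      · have hki : (k : Int) = s + m := by omega
        have hcond : s ≤ (k : Int) ∧ (k : Int) < s + ((m : Int) + 1) := by omega
        simp [hkm, hki]
      · have hki : (k : Int) ≠ s + m := by omega
        simp only [hkm, if_false]
        split_ifs with ha hb <;> first | rfl | (exfalso; omega)

theorem pvPaint_eq (g : List Int) (s L : Int) (hs : 0 ≤ s) (hL : 0 < L) :
    pvPaint g s L =
      (PySem.List.enumerate g 0).map
        (fun p => if s ≤ p.1 ∧ p.1 < s + L then (1 : Int) else p.2) := by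
  have hLL : L = ((L.toNat : Nat) : Int) := (Int.toNat_of_nonneg (le_of_lt hL)).symm
  rw [hLL]
  exact pvPaint_nat L.toNat g s hs

-- ===== VERDICT (by name: the statement is the Claim_ definition above) =====
theorem transform_paint_biggest_block_spec : Claim_equal_transform_paint_biggest_block := by
  unfold Claim_equal_transform_paint_biggest_block Spec_transform_paint_biggest_block
  intro g _
  rw [pvAlt_eq]
  have hmain := pvMain g.length g (le_refl _) 0 0 0 0 0
  simp only at hmain
  show transform_paint_biggest_block g =
    (if (pvFin ((PySem.List.enumerate g 0).foldl pvStep (0, 0, 0, 0, 0))).2 < 2 then g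
     else _)
  rw [hmain]
  simp only [transform_paint_biggest_block]
  by_cases hlt : (pvCollectRuns g 0).length < 2
  · simp only [hlt, if_true]
    rw [if_pos (by omega)]
  · match hr : pvCollectRuns g 0 with
    | [] => rw [hr] at hlt; simp at hlt
    | r :: rs =>
      rw [hr] at hlt
      rw [if_neg hlt, if_neg (by omega), pvMax_eq rs r]
      have hrfacts : 0 ≤ r.1 ∧ 0 < r.2 := by
        have := pvRuns_facts g.length g (le_refl _) 0 r (by rw [hr]; exact List.mem_cons_self ..)
        omega
      have hupd0 : pvUpd (0, 0) r = r := by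
        simp only [pvUpd]
        rw [if_pos (by simpa using hrfacts.2)]
      rw [List.foldl_cons, hupd0]
      have hbmem : rs.foldl pvUpd r ∈ r :: rs := PySem.List.max?_mem (pvMax_eq rs r)
      have hbfacts : 0 ≤ (rs.foldl pvUpd r).1 ∧ 0 < (rs.foldl pvUpd r).2 := by
        have := pvRuns_facts g.length g (le_refl _) 0 (rs.foldl pvUpd r) (by rw [hr]; exact hbmem)
        omega
      exact pvPaint_eq g _ _ hbfacts.1 hbfacts.2
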